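-- pv_equiv track=rewrite | github.com/gustin33/project_euler | 001-100/98_anagramic_squares.py | generate_square_numbers
-- ===== SOURCE A (Python) =====
-- def generate_square_numbers(max_length):
--     square_numbers = []
--     limit = 10 ** max_length
--     i = 1
--     while i * i < limit:
--         square_numbers.append(i * i)
--         i += 1
--     return square_numbers
-- ===== SOURCE B (Python) =====
-- def generate_square_numbers(max_length):
--     limit = 10 ** max_length
--     # find the largest n with n*n < limit: exponential search for an upper bound,
--     # then binary search; finally emit the squares by a comprehension.
--     hi = 1
--     while hi * hi < limit:
--         hi *= 2
--     lo = 0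
--     while lo < hi:
--         mid = (lo + hi + 1) // 2
--         if mid * mid < limit:
--             lo = mid
--         else:
--             hi = mid - 1
--     return [i * i for i in range(1, lo + 1)]
-- ===== Notes on version B (the rewrite author's own statement) =====
-- stated objective: alternative
-- what changed: B first computes the count of squares below the limit by exponential doubling plus binary search for the largest n with n*n < limit, then produces the result in a single comprehension over range(1, n+1), instead of A's one append-and-test loop.
import Mathlib
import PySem

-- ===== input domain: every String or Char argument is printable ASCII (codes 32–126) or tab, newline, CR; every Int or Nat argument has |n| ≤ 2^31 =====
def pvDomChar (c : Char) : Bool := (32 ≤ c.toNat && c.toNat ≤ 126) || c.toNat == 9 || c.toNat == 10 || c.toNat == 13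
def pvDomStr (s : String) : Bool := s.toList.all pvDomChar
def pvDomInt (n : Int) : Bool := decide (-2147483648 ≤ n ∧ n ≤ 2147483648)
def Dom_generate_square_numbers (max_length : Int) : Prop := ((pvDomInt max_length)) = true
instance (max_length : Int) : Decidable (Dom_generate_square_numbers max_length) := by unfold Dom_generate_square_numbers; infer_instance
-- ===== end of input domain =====

-- B replaces A's append-and-test loop by a staged algorithm: exponential doubling plus
-- binary search for the largest n with n*n < limit, then one comprehension over range(1, n+1).

-- ===== PORT A =====
-- Python A's while loop: append i*i while i*i < limit, i starting at 1.
-- The '1 ≤ i' conjunct is a termination guard only (true at the single call site and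
-- preserved by the loop; it makes the decreasing measure work for arbitrary arguments).
def goA (limit i : Int) (acc : List Int) : List Int :=
  if _h : 1 ≤ i ∧ i * i < limit then goA limit (i + 1) (acc ++ [i * i]) else acc
termination_by (limit - i * i).toNat
decreasing_by
  have hsq : (i + 1) * (i + 1) = i * i + 2 * i + 1 := by ring
  omega

def generate_square_numbers (max_length : Int) : List Int :=
  -- For max_length < 0 Python's `10 ** max_length` is a float strictly between 0 and 1,
  -- so the test `1*1 < limit` is false immediately and the loop body never runs: exact [].
  if max_length < 0 then [] else goA (10 ^ max_length.toNat) 1 []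

-- ===== PORT B =====
-- Python B's first loop: double hi while hi*hi < limit.  '1 ≤ hi' is a termination
-- guard only (true at the single call site and preserved).
def goHi (limit hi : Int) : Int :=
  if _h : 1 ≤ hi ∧ hi * hi < limit then goHi limit (hi * 2) else hi
termination_by (limit - hi * hi).toNat
decreasing_by
  have h1 : 1 ≤ hi * hi := by nlinarith [_h.1]
  have h2 : hi * 2 * (hi * 2) = 4 * (hi * hi) := by ring
  omega

-- Python B's binary-search loop: while lo < hi, mid = (lo+hi+1)//2, move lo or hi.
def goBS (limit lo hi : Int) : Int :=
  if _h : lo < hi then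
    let mid := PySem.Int.floordiv (lo + hi + 1) 2
    if mid * mid < limit then goBS limit mid hi else goBS limit lo (mid - 1)
  else lo
termination_by (hi - lo).toNat
decreasing_by
  all_goals rw [PySem.Int.floordiv_eq_ediv_of_pos (by norm_num)] at *
  all_goals omega

def generate_square_numbers_alt (max_length : Int) : List Int :=
  -- same float-limit remark as in Port A: for max_length < 0 both loops do nothing and
  -- range(1, 0+1) is empty, so Python B returns [].
  if max_length < 0 then [] else
    let limit : Int := 10 ^ max_length.toNat
    let hi := goHi limit 1
    let lo := goBS limit 0 hi
    (PySem.List.pyRange 1 (lo + 1) 1).map (fun i => i * i)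

-- ===== PRECONDITION & SPEC =====
def Spec_generate_square_numbers (max_length : Int) (out : List Int) : Prop := out = generate_square_numbers_alt max_length
instance (max_length : Int) (out : List Int) : Decidable (Spec_generate_square_numbers max_length out) := by unfold Spec_generate_square_numbers; infer_instance

-- ===== CLAIM =====
def Claim_equal_generate_square_numbers : Prop := ∀ (max_length : Int), Dom_generate_square_numbers max_length → Spec_generate_square_numbers max_length (generate_square_numbers max_length)

-- ===== LEMMAS AND PROOFS =====

-- The doubling loop returns a positive hi with hi*hi ≥ limit.
lemma goHi_spec (limit hi : Int) (h1 : 1 ≤ hi) :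
    1 ≤ goHi limit hi ∧ limit ≤ goHi limit hi * goHi limit hi := by
  fun_induction goHi limit hi with
  | case1 hi h ih => exact ih (by omega)
  | case2 hi h =>
    refine ⟨h1, ?_⟩
    by_contra hc
    exact h ⟨h1, by omega⟩

-- Binary search pins down the unique n with n*n < limit ≤ (n+1)*(n+1) kept in [lo, hi].
lemma goBS_spec (limit lo hi n : Int) (hlo : 0 ≤ lo) (h1 : lo ≤ n) (h2 : n ≤ hi)
    (hn1 : n * n < limit) (hn2 : limit ≤ (n + 1) * (n + 1)) :
    goBS limit lo hi = n := by
  fun_induction goBS limit lo hi with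
  | case1 lo hi h mid hmid ih =>
    have hmb : lo < mid ∧ mid ≤ hi := by
      simp only [mid, PySem.Int.floordiv_eq_ediv_of_pos (by norm_num : (0:Int) < 2)]
      omega
    apply ih (by omega) ?_ h2
    by_contra hc
    have : n + 1 ≤ mid := by omega
    nlinarith
  | case2 lo hi h mid hmid ih =>
    have hmb : lo < mid ∧ mid ≤ hi := by
      simp only [mid, PySem.Int.floordiv_eq_ediv_of_pos (by norm_num : (0:Int) < 2)]
      omega
    apply ih hlo h1
    by_contra hc
    have : mid ≤ n := by omega
    nlinarith
  | case3 lo hi h => omega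

-- Characterisation of A's loop as the mapped range up to that same n.
lemma goA_char (limit i : Int) (acc : List Int) (n : Int) (hi1 : 1 ≤ i) (hin : i ≤ n + 1)
    (hn1 : n * n < limit) (hn2 : limit ≤ (n + 1) * (n + 1)) :
    goA limit i acc = acc ++ (PySem.List.pyRange i (n + 1) 1).map (fun j => j * j) := by
  fun_induction goA limit i acc with
  | case1 i acc h ih =>
    have hile : i ≤ n := by
      by_contra hc
      have : n + 1 ≤ i := by omega
      nlinarith [h.1, h.2]
    rw [ih (by omega) (by omega),
      show PySem.List.pyRange i (n + 1) 1 = i :: PySem.List.pyRange (i + 1) (n + 1) 1 from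
        PySem.List.pyRange_one_cons (by omega)]
    simp
  | case2 i acc h =>
    have hge : n + 1 ≤ i := by
      by_contra hc
      push_neg at hc
      have hle : i * i ≤ n * n := by nlinarith
      exact h ⟨hi1, by omega⟩
    have hie : i = n + 1 := le_antisymm hin hge
    rw [hie, PySem.List.pyRange_one_eq_nil le_rfl]
    simp

-- ===== VERDICT =====
theorem generate_square_numbers_spec : Claim_equal_generate_square_numbers := by
  intro ml _
  unfold Spec_generate_square_numbers generate_square_numbers generate_square_numbers_alt
  split
  · rfl
  · set limit : Int := 10 ^ ml.toNat with hlim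
    have hpos : 1 ≤ limit := by
      have : (0 : Int) < 10 ^ ml.toNat := by positivity
      omega
    set n : Int := ((limit - 1).toNat.sqrt : Int) with hn
    have hm : ((limit - 1).toNat : Int) = limit - 1 := by omega
    have hn0 : 0 ≤ n := by rw [hn]; exact Int.natCast_nonneg _
    have hn1 : n * n < limit := by
      have h := Nat.sqrt_le' (limit - 1).toNat
      rw [pow_two] at h
      have h2 : (((limit - 1).toNat.sqrt : Int)) * (((limit - 1).toNat.sqrt : Int))
          ≤ ((limit - 1).toNat : Int) := by exact_mod_cast h
      rw [← hn] at h2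
      omega
    have hn2 : limit ≤ (n + 1) * (n + 1) := by
      have h := Nat.lt_succ_sqrt' (limit - 1).toNat
      rw [pow_two, Nat.succ_eq_add_one] at h
      have h2 : ((limit - 1).toNat : Int)
          < (((limit - 1).toNat.sqrt : Int) + 1) * (((limit - 1).toNat.sqrt : Int) + 1) := by
        exact_mod_cast h
      rw [← hn] at h2
      omega
    obtain ⟨hhi1, hhi2⟩ := goHi_spec limit 1 le_rfl
    have hnhi : n ≤ goHi limit 1 := by nlinarith
    show goA limit 1 [] =
      (PySem.List.pyRange 1 (goBS limit 0 (goHi limit 1) + 1) 1).map (fun i => i * i)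
    rw [goBS_spec limit 0 (goHi limit 1) n le_rfl hn0 hnhi hn1 hn2]
    exact goA_char limit 1 [] n le_rfl (by omega) hn1 hn2
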